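-- pv_equiv track=rewrite | github.com/Feuermurmel/whuts-solver | whuts-solver/whuts_solver/generator.py | iter_factorizations
-- ===== SOURCE A (Python) =====
-- def iter_factorizations(x, n):
--     if n == 0:
--         if x == 1:
--             yield ()
--     else:
--         for i in range(1, x + 1):
--             if not x % i:
--                 for factorization in iter_factorizations(x // i, n - 1):
--                     yield i, *factorization
-- ===== SOURCE B (Python) =====
-- def iter_factorizations(x, n):
--     if n == 0:
--         if x == 1:
--             yield ()
--     else:
--         # enumerate divisors of x as (i, x//i) pairs: small ones up, cofactors down
--         small = []
--         large = []
--         i = 1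
--         while i * i <= x:
--             if x % i == 0:
--                 small.append(i)
--                 q = x // i
--                 if i != q:
--                     large.append(q)
--             i += 1
--         for d in small + large[::-1]:
--             for rest in iter_factorizations(x // d, n - 1):
--                 yield (d, *rest)
-- ===== Notes on version B (the rewrite author's own statement) =====
-- stated objective: alternative
-- what changed: B enumerates the divisors of x as (i, x//i) pairs while i*i <= x (small divisors ascending, cofactors appended and reversed) instead of A's scan of range(1, x+1), then recurses over the same ascending divisor list; Pre_ only excludes n < 0 with x >= 1, where both A and B raise RecursionError.
import Mathlib
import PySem

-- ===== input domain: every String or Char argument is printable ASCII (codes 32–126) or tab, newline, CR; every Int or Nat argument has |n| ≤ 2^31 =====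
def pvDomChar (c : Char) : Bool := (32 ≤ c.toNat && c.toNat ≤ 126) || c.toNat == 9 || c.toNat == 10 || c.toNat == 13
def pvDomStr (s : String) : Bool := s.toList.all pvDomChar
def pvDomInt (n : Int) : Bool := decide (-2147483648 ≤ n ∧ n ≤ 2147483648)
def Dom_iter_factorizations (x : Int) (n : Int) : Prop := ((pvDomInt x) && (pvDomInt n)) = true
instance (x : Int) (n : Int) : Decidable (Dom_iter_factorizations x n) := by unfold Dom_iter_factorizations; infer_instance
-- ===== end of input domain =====

-- B enumerates the divisors of x as (i, x//i) pairs while i*i <= x instead of A's scan of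
-- range(1, x+1). Equivalence is about the yielded sequence (both Pythons are generators,
-- ported as the list of yielded tuples).

-- ===== PORT A =====
-- The recursion depth of the Python is exactly n (for n ≥ 0); the fuel argument only makes the
-- recursion structural. Inside Pre_ (n ≥ 0 or x ≤ 0) fuel n.toNat is never exhausted.
def pvIterFacA : Nat → Int → Int → List (List Int)
  | fuel, x, n =>
    if n == 0 then (if x == 1 then [[]] else [])
    else match fuel with
      | 0 => []
      | f + 1 =>
        (PySem.List.pyRange 1 (x + 1) 1).foldl
          (fun acc i =>
            if PySem.Int.mod x i == 0 then
              acc ++ (pvIterFacA f (PySem.Int.floordiv x i) (n - 1)).map (fun r => i :: r)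
            else acc) []

def iter_factorizations (x : Int) (n : Int) : List (List Int) := pvIterFacA n.toNat x n

-- ===== PORT B =====
-- while i * i <= x: collect small divisors (ascending) and their cofactors (descending);
-- structural recursion on i, front-consing, yields the same two lists as Source B's appends.
def pvDivPairs (x : Int) (i : Nat) : List Int × List Int :=
  if h : (i : Int) * i ≤ x then
    let rest := pvDivPairs x (i + 1)
    if PySem.Int.mod x i == 0 then
      let q := PySem.Int.floordiv x i
      ((i : Int) :: rest.1, if (i : Int) ≠ q then q :: rest.2 else rest.2)
    else rest
  else ([], [])
termination_by (x + 1 - (i : Int)).toNat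
decreasing_by
  have h1 : (i : Int) ≤ (i : Int) * i := by
    rcases Nat.eq_zero_or_pos i with h0 | h0
    · simp [h0]
    · have : (1 : Int) ≤ (i : Int) := by exact_mod_cast h0
      nlinarith
  have h2 : (i : Int) ≤ x := le_trans h1 h
  omega

def pvIterFacB : Nat → Int → Int → List (List Int)
  | fuel, x, n =>
    if n == 0 then (if x == 1 then [[]] else [])
    else match fuel with
      | 0 => []
      | f + 1 =>
        let p := pvDivPairs x 1
        (p.1 ++ p.2.reverse).foldl
          (fun acc d =>
            acc ++ (pvIterFacB f (PySem.Int.floordiv x d) (n - 1)).map (fun r => d :: r)) []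

def iter_factorizations_alt (x : Int) (n : Int) : List (List Int) := pvIterFacB n.toNat x n

-- ===== PRECONDITION & SPEC =====
-- On n < 0 with x ≥ 1 the Python A (and B alike) recurses forever and raises RecursionError;
-- Pre_ excludes exactly those inputs. A returns on every other input.
def Pre_iter_factorizations (x : Int) (n : Int) : Prop := 0 ≤ n ∨ x ≤ 0
instance (x : Int) (n : Int) : Decidable (Pre_iter_factorizations x n) := by unfold Pre_iter_factorizations; infer_instance
def pvWitness_iter_factorizations : Int × Int := (12, 3)

def Spec_iter_factorizations (x : Int) (n : Int) (out : List (List Int)) : Prop := out = iter_factorizations_alt x n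
instance (x : Int) (n : Int) (out : List (List Int)) : Decidable (Spec_iter_factorizations x n out) := by unfold Spec_iter_factorizations; infer_instance

-- ===== CLAIM (what is proved, stated in full; the proofs are below) =====
def Claim_equal_iter_factorizations : Prop := ∀ (x : Int) (n : Int), Dom_iter_factorizations x n → Pre_iter_factorizations x n → Spec_iter_factorizations x n (iter_factorizations x n)

-- ===== LEMMAS AND PROOFS =====

-- The divisor-set predicate that pvDivPairs x i still has to produce: divisors d of x with
-- both d and its cofactor at least i.
abbrev pvP (x : Int) (i : Nat) (d : Int) : Prop :=
  PySem.Int.mod x d = 0 ∧ (i : Int) ≤ d ∧ (i : Int) ≤ PySem.Int.floordiv x d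

theorem pv_key (x d : Int) (hd : 0 < d) (hm : PySem.Int.mod x d = 0) :
    d * PySem.Int.floordiv x d = x := by
  have hdvd : d ∣ x := (PySem.Int.mod_eq_zero_iff_dvd x d).mp hm
  rw [PySem.Int.floordiv_eq_ediv_of_pos hd, mul_comm]
  exact Int.ediv_mul_cancel hdvd

theorem pv_floordiv_eq (x d q : Int) (hd : 0 < d) (hx : d * q = x) :
    PySem.Int.floordiv x d = q := by
  rw [PySem.Int.floordiv_eq_ediv_of_pos hd, ← hx]
  exact Int.mul_ediv_cancel_left q (ne_of_gt hd)

theorem pv_mod_zero_of_mul (x d q : Int) (_hq : 0 < q) (hx : d * q = x) :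
    PySem.Int.mod x q = 0 := by
  exact (PySem.Int.mod_eq_zero_iff_dvd x q).mpr ⟨d, by rw [← hx, mul_comm]⟩

-- filter over a strictly sorted list: prepending one new minimal element
theorem pv_filter_cons (l : List Int) (hl : l.Pairwise (· < ·)) (p q : Int → Bool) (a : Int)
    (ha : a ∈ l) (hpq : ∀ d ∈ l, p d = (decide (d = a) || q d))
    (hq : ∀ d ∈ l, q d = true → a < d) :
    l.filter p = a :: l.filter q := by
  induction l with
  | nil => cases ha
  | cons y t ih =>
    rw [List.pairwise_cons] at hl
    obtain ⟨hy, ht⟩ := hl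
    by_cases hya : y = a
    · subst hya
      have hpa : p y = true := by rw [hpq y (by simp)]; simp
      have hqa : q y = false := by
        rcases Bool.eq_false_or_eq_true (q y) with h | h
        · exact absurd (hq y (by simp) h) (by omega)
        · exact h
      rw [List.filter_cons_of_pos hpa, List.filter_cons_of_neg (by simp [hqa])]
      congr 1
      apply List.filter_congr
      intro d hd
      have hne : ¬ (d = y) := ne_of_gt (hy d hd)
      rw [hpq d (by simp [hd])]
      simp [hne]
    · have hat : a ∈ t := by
        rcases List.mem_cons.mp ha with h | h
        · exact absurd h.symm hya
        · exact h
      have hya' : y < a := hy a hat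
      have hqy : q y = false := by
        rcases Bool.eq_false_or_eq_true (q y) with h | h
        · exact absurd (hq y (by simp) h) (by omega)
        · exact h
      have hpy : p y = false := by rw [hpq y (by simp)]; simp [hya, hqy]
      rw [List.filter_cons_of_neg (by simp [hpy]), List.filter_cons_of_neg (by simp [hqy])]
      exact ih ht hat (fun d hd => hpq d (by simp [hd])) (fun d hd => hq d (by simp [hd]))

-- filter over a strictly sorted list: appending one new maximal element
theorem pv_filter_snoc (l : List Int) (hl : l.Pairwise (· < ·)) (p q : Int → Bool) (b : Int)
    (hb : b ∈ l) (hpq : ∀ d ∈ l, p d = (q d || decide (d = b)))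
    (hq : ∀ d ∈ l, q d = true → d < b) :
    l.filter p = l.filter q ++ [b] := by
  induction l with
  | nil => cases hb
  | cons y t ih =>
    rw [List.pairwise_cons] at hl
    obtain ⟨hy, ht⟩ := hl
    by_cases hyb : y = b
    · subst hyb
      have hqy : q y = false := by
        rcases Bool.eq_false_or_eq_true (q y) with h | h
        · exact absurd (hq y (by simp) h) (by omega)
        · exact h
      have hpy : p y = true := by rw [hpq y (by simp)]; simp
      rw [List.filter_cons_of_pos hpy, List.filter_cons_of_neg (by simp [hqy])]
      have hpt : t.filter p = [] := by
        apply List.filter_eq_nil_iff.mpr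
        intro d hd
        have hyd : y < d := hy d hd
        have hqd : q d = false := by
          rcases Bool.eq_false_or_eq_true (q d) with h | h
          · exact absurd (hq d (by simp [hd]) h) (by omega)
          · exact h
        rw [hpq d (by simp [hd])]
        simp [hqd]
        omega
      have hqt : t.filter q = [] := by
        apply List.filter_eq_nil_iff.mpr
        intro d hd
        have hyd : y < d := hy d hd
        rcases Bool.eq_false_or_eq_true (q d) with h | h
        · exact absurd (hq d (by simp [hd]) h) (by omega)
        · simp [h]
      rw [hpt, hqt]
      simp
    · have hbt : b ∈ t := by
        rcases List.mem_cons.mp hb with h | h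
        · exact absurd h.symm hyb
        · exact h
      have hpy : p y = q y := by rw [hpq y (by simp)]; simp [hyb]
      have ihr := ih ht hbt (fun d hd => hpq d (by simp [hd])) (fun d hd => hq d (by simp [hd]))
      by_cases hqy : q y = true
      · rw [List.filter_cons_of_pos (by rw [hpy]; exact hqy), List.filter_cons_of_pos hqy, ihr]
        simp
      · rw [List.filter_cons_of_neg (by rw [hpy]; exact hqy), List.filter_cons_of_neg hqy, ihr]

theorem pv_filter_cons_snoc (l : List Int) (hl : l.Pairwise (· < ·)) (p q : Int → Bool)
    (a b : Int) (ha : a ∈ l) (hb : b ∈ l) (hab : a < b)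
    (hpq : ∀ d ∈ l, p d = (decide (d = a) || q d || decide (d = b)))
    (hq : ∀ d ∈ l, q d = true → a < d ∧ d < b) :
    l.filter p = a :: l.filter q ++ [b] := by
  have h1 : l.filter p = a :: l.filter (fun d => q d || decide (d = b)) := by
    apply pv_filter_cons l hl p _ a ha
    · intro d hd
      rw [hpq d hd, Bool.or_assoc]
    · intro d hd hqd
      rcases Bool.or_eq_true_iff.mp hqd with h | h
      · exact (hq d hd h).1
      · have : d = b := of_decide_eq_true h
        omega
  have h2 : l.filter (fun d => q d || decide (d = b)) = l.filter q ++ [b] := by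
    apply pv_filter_snoc l hl _ q b hb
    · intro d hd; rfl
    · intro d hd hqd
      exact (hq d hd hqd).2
  rw [h1, h2]
  simp

-- main invariant: pvDivPairs x i lists, in ascending order, exactly the divisors d of x
-- with both d ≥ i and x // d ≥ i
theorem pv_pairs_eq (x : Int) (i : Nat) : 1 ≤ i →
    (pvDivPairs x i).1 ++ (pvDivPairs x i).2.reverse
      = (PySem.List.pyRange 1 (x + 1) 1).filter (fun d => decide (pvP x i d)) := by
  fun_induction pvDivPairs x i with
  | case1 i hii rest hm q ih =>
    intro hi
    have hi1 : (1 : Int) ≤ (i : Int) := by exact_mod_cast hi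
    have hipos : (0 : Int) < (i : Int) := by omega
    have hm' : PySem.Int.mod x (i : Int) = 0 := by simpa using hm
    have hxq : (i : Int) * q = x := pv_key x i hipos hm'
    have hilex : (i : Int) ≤ x := by nlinarith
    have hx1 : (1 : Int) ≤ x := by nlinarith
    have hqi : (i : Int) ≤ q := (PySem.Int.le_floordiv_iff_mul_le hipos).mpr hii
    have hq0 : (0 : Int) < q := by omega
    have hqlex : q ≤ x := by nlinarith
    have hmemi : (i : Int) ∈ PySem.List.pyRange 1 (x + 1) 1 :=
      PySem.List.mem_pyRange_one.mpr ⟨hi1, by omega⟩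
    have hmemq : q ∈ PySem.List.pyRange 1 (x + 1) 1 :=
      PySem.List.mem_pyRange_one.mpr ⟨by omega, by omega⟩
    have hpair := PySem.List.pairwise_lt_pyRange_one 1 (x + 1)
    have ihr := ih (by omega)
    by_cases hiq : (i : Int) ≠ q
    · have hiltq : (i : Int) < q := by omega
      simp only [if_pos hiq]
      have : ((i : Int) :: rest.1) ++ (q :: rest.2).reverse
          = (i : Int) :: (rest.1 ++ rest.2.reverse) ++ [q] := by simp
      rw [this, ihr]
      symm
      apply pv_filter_cons_snoc _ hpair _ _ (i : Int) q hmemi hmemq hiltq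
      · intro d hd
        obtain ⟨hd1, hdx⟩ := PySem.List.mem_pyRange_one.mp hd
        have hd0 : (0 : Int) < d := by omega
        rw [Bool.eq_iff_iff]
        simp only [Bool.or_eq_true, decide_eq_true_eq]
        constructor
        · rintro ⟨hmd, hdi, hdi'⟩
          by_cases hdieq : d = (i : Int)
          · exact Or.inl (Or.inl hdieq)
          by_cases hdqeq : d = q
          · exact Or.inr hdqeq
          refine Or.inl (Or.inr ⟨hmd, by push_cast; omega, ?_⟩)
          have hdd : d * PySem.Int.floordiv x d = x := pv_key x d hd0 hmd
          have hne : PySem.Int.floordiv x d ≠ (i : Int) := by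
            intro heq
            rw [heq] at hdd
            have : q = d := by
              rw [← pv_floordiv_eq x (i : Int) d hipos (by rw [mul_comm]; exact hdd)]
            exact hdqeq this.symm
          push_cast
          omega
        · rintro (⟨hdieq | ⟨hmd, hdi, hdi'⟩⟩ | hdqeq)
          · subst hdieq
            exact ⟨hm', le_refl _, hqi⟩
          · exact ⟨hmd, by push_cast at hdi ⊢; omega, by push_cast at hdi' ⊢; omega⟩
          · subst hdqeq
            exact ⟨pv_mod_zero_of_mul x (i : Int) q hq0 hxq,
              hqi, le_of_eq (pv_floordiv_eq x q (i : Int) hq0 (by rw [mul_comm]; exact hxq)).symm⟩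
      · intro d hd hqd
        obtain ⟨hmd, hdi, hdi'⟩ := of_decide_eq_true hqd
        obtain ⟨hd1, hdx⟩ := PySem.List.mem_pyRange_one.mp hd
        have hd0 : (0 : Int) < d := by omega
        push_cast at hdi hdi'
        refine ⟨by omega, ?_⟩
        have hmul : ((i : Int) + 1) * d ≤ x :=
          (PySem.Int.le_floordiv_iff_mul_le hd0).mp (by omega)
        nlinarith
    · -- i = q : x // i equals i, the square-root divisor, added once
      simp only [if_neg hiq]
      have hiq' : (i : Int) = q := by omega
      have : ((i : Int) :: rest.1) ++ rest.2.reverse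
          = (i : Int) :: (rest.1 ++ rest.2.reverse) := by simp
      rw [this, ihr]
      symm
      apply pv_filter_cons _ hpair _ _ (i : Int) hmemi
      · intro d hd
        obtain ⟨hd1, hdx⟩ := PySem.List.mem_pyRange_one.mp hd
        have hd0 : (0 : Int) < d := by omega
        rw [Bool.eq_iff_iff]
        simp only [Bool.or_eq_true, decide_eq_true_eq]
        constructor
        · rintro ⟨hmd, hdi, hdi'⟩
          by_cases hdieq : d = (i : Int)
          · exact Or.inl hdieq
          refine Or.inr ⟨hmd, by push_cast; omega, ?_⟩
          have hdd : d * PySem.Int.floordiv x d = x := pv_key x d hd0 hmd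
          have hne : PySem.Int.floordiv x d ≠ (i : Int) := by
            intro heq
            rw [heq] at hdd
            have : q = d := by
              rw [← pv_floordiv_eq x (i : Int) d hipos (by rw [mul_comm]; exact hdd)]
            omega
          push_cast
          omega
        · rintro (hdieq | ⟨hmd, hdi, hdi'⟩)
          · subst hdieq
            exact ⟨hm', le_refl _, hqi⟩
          · exact ⟨hmd, by push_cast at hdi ⊢; omega, by push_cast at hdi' ⊢; omega⟩
      · intro d hd hqd
        obtain ⟨hmd, hdi, hdi'⟩ := of_decide_eq_true hqd
        push_cast at hdi
        omega
  | case2 i hii rest hm ih =>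
    intro hi
    have hi1 : (1 : Int) ≤ (i : Int) := by exact_mod_cast hi
    have hipos : (0 : Int) < (i : Int) := by omega
    have hm' : PySem.Int.mod x (i : Int) ≠ 0 := by simpa using hm
    rw [ih (by omega)]
    symm
    apply List.filter_congr
    intro d hd
    obtain ⟨hd1, hdx⟩ := PySem.List.mem_pyRange_one.mp hd
    have hd0 : (0 : Int) < d := by omega
    apply decide_eq_decide.mpr
    constructor
    · rintro ⟨hmd, hdi, hdi'⟩
      have hdieq : d ≠ (i : Int) := by
        intro h; rw [h] at hmd; exact hm' hmd
      refine ⟨hmd, by push_cast; omega, ?_⟩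
      have hdd : d * PySem.Int.floordiv x d = x := pv_key x d hd0 hmd
      have hne : PySem.Int.floordiv x d ≠ (i : Int) := by
        intro heq
        rw [heq] at hdd
        exact hm' ((PySem.Int.mod_eq_zero_iff_dvd x (i : Int)).mpr ⟨d, by rw [← hdd]; ring⟩)
      push_cast
      omega
    · rintro ⟨hmd, hdi, hdi'⟩
      exact ⟨hmd, by push_cast at hdi ⊢; omega, by push_cast at hdi' ⊢; omega⟩
  | case3 i hii =>
    intro hi
    have hi1 : (1 : Int) ≤ (i : Int) := by exact_mod_cast hi
    symm
    simp only [List.nil_append, List.reverse_nil]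
    apply List.filter_eq_nil_iff.mpr
    intro d hd hP
    obtain ⟨hmd, hdi, hdi'⟩ := of_decide_eq_true hP
    obtain ⟨hd1, hdx⟩ := PySem.List.mem_pyRange_one.mp hd
    have hd0 : (0 : Int) < d := by omega
    have hdd : d * PySem.Int.floordiv x d = x := pv_key x d hd0 hmd
    have : (i : Int) * (i : Int) ≤ d * PySem.Int.floordiv x d :=
      mul_le_mul hdi hdi' (by omega) (by omega)
    omega

theorem pv_divisors_eq (x : Int) :
    (pvDivPairs x 1).1 ++ (pvDivPairs x 1).2.reverse
      = (PySem.List.pyRange 1 (x + 1) 1).filter (fun d => PySem.Int.mod x d == 0) := by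
  rw [pv_pairs_eq x 1 (by omega)]
  apply List.filter_congr
  intro d hd
  obtain ⟨hd1, hdx⟩ := PySem.List.mem_pyRange_one.mp hd
  have hd0 : (0 : Int) < d := by omega
  rw [Bool.eq_iff_iff]
  simp only [decide_eq_true_eq, beq_iff_eq]
  constructor
  · rintro ⟨hmd, _, _⟩; exact hmd
  · intro hmd
    refine ⟨hmd, by push_cast; omega, ?_⟩
    have : (1 : Int) * d ≤ x := by omega
    exact_mod_cast (PySem.Int.le_floordiv_iff_mul_le hd0).mpr this

theorem pv_fuel_eq : ∀ (f : Nat) (x n : Int), pvIterFacA f x n = pvIterFacB f x n := by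
  intro f
  induction f with
  | zero =>
    intro x n
    rw [pvIterFacA.eq_def, pvIterFacB.eq_def]
  | succ f ih =>
    intro x n
    rw [pvIterFacA.eq_def, pvIterFacB.eq_def]
    by_cases hn : (n == 0) = true
    · simp [hn]
    · simp only [hn]
      rw [PySem.List.foldl_if_eq_foldl_filter, PySem.List.foldl_append_eq_flatMap,
        PySem.List.foldl_append_eq_flatMap, ← pv_divisors_eq x]
      simp only [ih]

-- ===== VERDICT (by name: the statement is the Claim_ definition above) =====
theorem iter_factorizations_spec : Claim_equal_iter_factorizations := by
  intro x n _ _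
  unfold Spec_iter_factorizations iter_factorizations iter_factorizations_alt
  exact pv_fuel_eq n.toNat x n
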